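-- pv_equiv track=rewrite | github.com/ccng830/NgChiChon-sga-lsml1 | ChiChonNg-dataframe/ChiChonNg-dataframe.py | construct_route
-- ===== SOURCE A (Python) =====
-- def construct_route(s):
--     temp = str(s).split('-')
--     if temp[0] == 'err':
--         return ''
--     ans = temp[0]
--     for i in range(len(temp)-1):
--         if temp[i+1] == 'err':
--             return ans
--         if temp[i+1] != temp[i]:
--             ans += '-'
--             ans += temp[i+1]
--     return ans
-- ===== SOURCE B (Python) =====
-- def construct_route(s):
--     tokens = str(s).split('-')
--     prefix = []
--     for t in tokens:
--         if t == 'err':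
--             break
--         prefix.append(t)
--     return '-'.join(dedup(prefix))
--
-- def dedup(xs):
--     if len(xs) < 2:
--         return xs[:]
--     rest = dedup(xs[1:])
--     return rest if xs[0] == xs[1] else [xs[0]] + rest
-- ===== Notes on version B (the rewrite author's own statement) =====
-- stated objective: simpler
-- what changed: Replaces A's single interleaved index loop with string concatenation by three composed passes: take tokens until the first 'err', recursively collapse adjacent duplicate runs, then one '-'.join.
import Mathlib
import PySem

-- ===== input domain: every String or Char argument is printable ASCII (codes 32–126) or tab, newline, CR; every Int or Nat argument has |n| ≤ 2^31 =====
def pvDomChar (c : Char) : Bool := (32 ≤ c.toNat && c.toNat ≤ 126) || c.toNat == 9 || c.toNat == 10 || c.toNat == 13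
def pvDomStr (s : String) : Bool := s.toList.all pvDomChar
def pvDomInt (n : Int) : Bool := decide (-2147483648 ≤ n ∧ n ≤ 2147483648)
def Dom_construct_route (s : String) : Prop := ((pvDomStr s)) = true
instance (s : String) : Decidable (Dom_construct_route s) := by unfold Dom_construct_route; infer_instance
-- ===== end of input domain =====

-- B decomposes the task into two composed passes (take until 'err', then collapse adjacent
-- duplicates recursively, then one join) instead of A's single interleaved index loop; objective: simpler.

-- ===== PORT A =====
-- the for-loop over range(len(temp)-1): prev = temp[i], ans the accumulator
def goA (prev ans : String) : List String → String
  | [] => ans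
  | t :: ts => if t = "err" then ans else if t ≠ prev then goA t (ans ++ "-" ++ t) ts else goA t ans ts

def construct_route (s : String) : String :=
  match (PySem.Str.split? s "-").getD [] with
  | [] => ""           -- unreachable: split('-') never returns an empty list
  | t0 :: rest => if t0 = "err" then "" else goA t0 t0 rest

-- ===== PORT B =====
-- the break-loop collecting tokens before the first 'err'
def takeUntilErr : List String → List String
  | [] => []
  | t :: ts => if t = "err" then [] else t :: takeUntilErr ts

-- recursive collapse of adjacent duplicates (Source B's dedup)
def dedupRuns : List String → List String
  | [] => []
  | [x] => [x]
  | x :: y :: ys => if x = y then dedupRuns (y :: ys) else x :: dedupRuns (y :: ys)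

def construct_route_alt (s : String) : String :=
  PySem.Str.join "-" (dedupRuns (takeUntilErr ((PySem.Str.split? s "-").getD [])))

-- ===== PRECONDITION & SPEC =====
def Spec_construct_route (s : String) (out : String) : Prop := out = construct_route_alt s
instance (s : String) (out : String) : Decidable (Spec_construct_route s out) := by unfold Spec_construct_route; infer_instance

-- ===== CLAIM (what is proved, stated in full; the proofs are below) =====
def Claim_equal_construct_route : Prop := ∀ (s : String), Dom_construct_route s → Spec_construct_route s (construct_route s)

-- ===== LEMMAS AND PROOFS =====

-- adjacent-dedup relative to a previous token: what A's loop emits after `ans`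
def walk (prev : String) : List String → List String
  | [] => []
  | t :: ts => if t = prev then walk t ts else t :: walk t ts

def emit : List String → String
  | [] => ""
  | t :: ts => "-" ++ t ++ emit ts

theorem goA_eq (rest : List String) : ∀ (prev ans : String),
    goA prev ans rest = ans ++ emit (walk prev (takeUntilErr rest)) := by
  induction rest with
  | nil => intro prev ans; simp [goA, takeUntilErr, walk, emit]
  | cons t ts ih =>
    intro prev ans
    by_cases he : t = "err"
    · simp [goA, takeUntilErr, walk, emit, he]
    · by_cases hp : t = prev
      · subst hp; simp [goA, takeUntilErr, walk, he, ih]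
      · simp [goA, takeUntilErr, walk, emit, he, hp, ih, String.append_assoc]

theorem dedupRuns_cons (xs : List String) : ∀ (p : String),
    dedupRuns (p :: xs) = p :: walk p xs := by
  induction xs with
  | nil => intro p; simp [dedupRuns, walk]
  | cons y ys ih =>
    intro p
    by_cases h : p = y
    · simp [dedupRuns, walk, h, ih]
    · simp [dedupRuns, walk, h, Ne.symm h, ih]

theorem join_cons (l : List String) : ∀ (t0 : String),
    PySem.Str.join "-" (t0 :: l) = t0 ++ emit l := by
  induction l with
  | nil => intro t0; simp [PySem.Str.join, PySem.Chars.join, emit, List.intercalate]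
  | cons y ys ih =>
    intro t0
    have key : ∀ a b : String, a.toList = b.toList → a = b := by
      intro a b h; have := congrArg String.ofList h; simpa using this
    apply key
    have := congrArg String.toList (ih y)
    simp [PySem.Str.join, PySem.Chars.join, List.intercalate, emit] at *
    simp [this]

-- ===== VERDICT (by name: the statement is the Claim_ definition above) =====
theorem construct_route_spec : Claim_equal_construct_route := by
  intro s _
  unfold Spec_construct_route construct_route construct_route_alt
  cases h : (PySem.Str.split? s "-").getD [] with
  | nil => simp [takeUntilErr, dedupRuns, PySem.Str.join, PySem.Chars.join, List.intercalate]
  | cons t0 rest =>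
    by_cases he : t0 = "err"
    · simp [he, takeUntilErr, dedupRuns, PySem.Str.join, PySem.Chars.join, List.intercalate]
    · simp [he, takeUntilErr, goA_eq, dedupRuns_cons, join_cons]
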